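-- pv_equiv track=rewrite | github.com/piecuch-group/ccpy | ccpy/models/operators.py | get_particle_combinations
-- ===== SOURCE A (Python) =====
-- def get_particle_combinations(n):
--     combs = []
--     for i in range(n + 1):
--         temp = ['V'] * n
--         for j in range(i):
--             temp[n - 1 - j] = 'v'
--         combs.append(temp)
--     return combs
-- ===== SOURCE B (Python) =====
-- def get_particle_combinations(n):
--     if n < 0:
--         return []
--     row = ['V'] * n
--     combs = [row.copy()]
--     for i in range(n - 1, -1, -1):
--         row[i] = 'v'
--         combs.append(row.copy())
--     return combs
-- ===== Notes on version B (the rewrite author's own statement) =====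
-- stated objective: faster
-- what changed: B maintains a single evolving row across one flat countdown loop, flipping exactly one cell per step and snapshotting it, instead of A's nested loops that reallocate an all-'V' row and rewrite its whole tail for every i.
import Mathlib
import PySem

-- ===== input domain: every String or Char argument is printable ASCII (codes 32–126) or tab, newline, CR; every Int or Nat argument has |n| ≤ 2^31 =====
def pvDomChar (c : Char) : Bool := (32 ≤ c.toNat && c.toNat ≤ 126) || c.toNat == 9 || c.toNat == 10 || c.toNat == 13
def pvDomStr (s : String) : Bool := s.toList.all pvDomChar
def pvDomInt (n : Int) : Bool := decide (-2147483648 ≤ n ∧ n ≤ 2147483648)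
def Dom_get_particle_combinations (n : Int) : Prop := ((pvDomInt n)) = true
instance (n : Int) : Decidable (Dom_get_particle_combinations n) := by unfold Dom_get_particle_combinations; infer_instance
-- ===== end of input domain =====

-- B keeps one evolving row, flipping a single cell per step of one flat countdown loop and snapshotting it, instead of A's nested rebuild-the-row loops (objective: faster by a constant factor).
-- ===== PORT A =====
def get_particle_combinations (n : Int) : List (List String) :=
  (PySem.List.pyRange 0 (n + 1) 1).foldl
    (fun combs i =>
      let temp := PySem.List.pyRepeat ["V"] n
      let temp := (PySem.List.pyRange 0 i 1).foldl
        (fun t j => PySem.List.pySetD t (n - 1 - j) "v") temp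
      combs ++ [temp])
    []

-- ===== PORT B =====
-- state = (row, combs); row[i] = 'v' then combs.append(row.copy())
def get_particle_combinations_alt (n : Int) : List (List String) :=
  if n < 0 then [] else
    let row := PySem.List.pyRepeat ["V"] n
    let st := (PySem.List.pyRange (n - 1) (-1) (-1)).foldl
      (fun (st : List String × List (List String)) i =>
        let row' := PySem.List.pySetD st.1 i "v"
        (row', st.2 ++ [row'])) (row, [row])
    st.2

-- ===== PRECONDITION & SPEC =====
def Spec_get_particle_combinations (n : Int) (out : List (List String)) : Prop := out = get_particle_combinations_alt n
instance (n : Int) (out : List (List String)) : Decidable (Spec_get_particle_combinations n out) := by unfold Spec_get_particle_combinations; infer_instance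

-- ===== CLAIM (what is proved, stated in full; the proofs are below) =====
def Claim_equal_get_particle_combinations : Prop := ∀ (n : Int), Dom_get_particle_combinations n → Spec_get_particle_combinations n (get_particle_combinations n)

-- ===== LEMMAS AND PROOFS =====

-- setting the last element of a replicate block
lemma set_replicate_last {α : Type} (a b : α) (k : Nat) :
    (List.replicate (k + 1) a).set k b = List.replicate k a ++ [b] := by
  induction k with
  | zero => simp
  | succ k ih =>
    rw [List.replicate_succ, List.set_cons_succ, ih]
    simp [List.replicate_succ]

-- the inner loop of A turns the last i slots of the all-'V' row into 'v'
lemma inner_loop_eq (n' i : Nat) (h : i ≤ n') :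
    (PySem.List.pyRange 0 (i : Int) 1).foldl
      (fun t j => PySem.List.pySetD t ((n' : Int) - 1 - j) "v")
      (List.replicate n' "V")
    = List.replicate (n' - i) "V" ++ List.replicate i "v" := by
  induction i with
  | zero => simp
  | succ i ih =>
    have h' : i ≤ n' := Nat.le_of_succ_le h
    have hsplit : PySem.List.pyRange 0 ((i : Int) + 1) 1
        = PySem.List.pyRange 0 (i : Int) 1 ++ [(i : Int)] :=
      PySem.List.pyRange_one_succ_right (by exact_mod_cast Nat.zero_le i)
    have hnn : (0 : Int) ≤ (n' : Int) - 1 - (i : Int) := by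
      have : i + 1 ≤ n' := h
      omega
    push_cast
    rw [hsplit, List.foldl_append, ih h']
    simp only [List.foldl_cons, List.foldl_nil]
    rw [PySem.List.pySetD_of_nonneg _ _ hnn]
    have htn : ((n' : Int) - 1 - (i : Int)).toNat = n' - 1 - i := by omega
    rw [htn]
    have hk : n' - i = (n' - 1 - i) + 1 := by omega
    rw [hk, List.set_append_left, set_replicate_last]
    have : n' - (i + 1) = n' - 1 - i := by omega
    rw [this, List.append_assoc]
    · simp [List.replicate_succ]
    · simp

-- A's result in closed row form
lemma portA_rows (n : Int) :
    get_particle_combinations n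
      = (PySem.List.pyRange 0 (n + 1) 1).map
          (fun i => List.replicate (n - i).toNat "V" ++ List.replicate i.toNat "v") := by
  unfold get_particle_combinations
  rw [PySem.List.foldl_append_singleton_eq_map]
  simp only [List.nil_append]
  apply List.map_congr_left
  intro i hi
  have hmem := PySem.List.mem_pyRange_one.mp hi
  have h0i : 0 ≤ i := hmem.1
  have hin : i ≤ n := by omega
  have hi' : i = ((i.toNat : Int)) := by omega
  have hn' : n = ((n.toNat : Int)) := by omega
  rw [PySem.List.pyRepeat_singleton]
  calc (PySem.List.pyRange 0 i 1).foldl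
        (fun t j => PySem.List.pySetD t (n - 1 - j) "v") (List.replicate n.toNat "V")
      = (PySem.List.pyRange 0 ((i.toNat : Nat) : Int) 1).foldl
        (fun t j => PySem.List.pySetD t (((n.toNat : Nat) : Int) - 1 - j) "v")
        (List.replicate n.toNat "V") := by rw [← hi', ← hn']
    _ = List.replicate (n.toNat - i.toNat) "V" ++ List.replicate i.toNat "v" :=
        inner_loop_eq n.toNat i.toNat (by omega)
    _ = List.replicate (n - i).toNat "V" ++ List.replicate i.toNat "v" := by
        congr 1; congr 1; omega

-- A's rows re-indexed over a Nat range
lemma portA_rows_nat (m : Nat) :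
    get_particle_combinations ((m : Nat) : Int)
      = (List.range (m + 1)).map
          (fun k => List.replicate (m - k) "V" ++ List.replicate k "v") := by
  rw [portA_rows, PySem.List.pyRange_one]
  have hN : (((m : Nat) : Int) + 1 - 0).toNat = m + 1 := by omega
  rw [hN, List.map_map]
  apply List.map_congr_left
  intro k _
  simp only [Function.comp_apply]
  have e1 : (((m : Nat) : Int) - (0 + (k : Int))).toNat = m - k := by omega
  have e2 : ((0 : Int) + (k : Int)).toNat = k := by omega
  rw [e1, e2]

-- invariant of B's flat loop: counting down from k-1 to 0 over a row with k leading 'V's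
lemma alt_loop_eq (k t : Nat) (acc : List (List String)) :
    (PySem.List.pyRange ((k : Int) - 1) (-1) (-1)).foldl
      (fun (st : List String × List (List String)) i =>
        (PySem.List.pySetD st.1 i "v", st.2 ++ [PySem.List.pySetD st.1 i "v"]))
      (List.replicate k "V" ++ List.replicate t "v", acc)
    = (List.replicate (t + k) "v",
       acc ++ (List.range k).map
         (fun j => List.replicate (k - 1 - j) "V" ++ List.replicate (t + 1 + j) "v")) := by
  induction k generalizing t acc with
  | zero =>
    rw [PySem.List.pyRange_neg_one_eq_nil (by omega)]
    simp
  | succ k ih =>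
    have hcons : PySem.List.pyRange (((k : Nat) + 1 : Int) - 1) (-1) (-1)
        = ((k : Nat) : Int) :: PySem.List.pyRange (((k : Nat) : Int) - 1) (-1) (-1) := by
      have : (((k : Nat) + 1 : Int) - 1) = ((k : Nat) : Int) := by ring
      rw [this, PySem.List.pyRange_neg_one_cons (by omega)]
    push_cast
    rw [hcons, List.foldl_cons]
    have hset : PySem.List.pySetD (List.replicate (k + 1) "V" ++ List.replicate t "v")
        ((k : Nat) : Int) "v"
        = List.replicate k "V" ++ List.replicate (t + 1) "v" := by
      rw [PySem.List.pySetD_of_nonneg _ _ (by omega)]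
      have h1 : (((k : Nat) : Int)).toNat = k := by omega
      rw [h1, List.set_append_left, set_replicate_last]
      · simp [List.replicate_succ, List.append_assoc]
      · simp
    simp only [hset]
    rw [ih (t + 1) (acc ++ [List.replicate k "V" ++ List.replicate (t + 1) "v"])]
    simp only [Prod.mk.injEq]
    constructor
    · congr 1; omega
    · rw [List.range_succ_eq_map, List.map_cons, List.map_map, List.append_assoc]
      congr 1
      rw [List.singleton_append]
      congr 1
      apply List.map_congr_left
      intro a _
      simp only [Function.comp_apply, Nat.succ_eq_add_one]
      have e1 : k - (a + 1) = k - 1 - a := by omega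
      have e2 : t + 1 + (a + 1) = t + 1 + 1 + a := by omega
      rw [e1, e2]

-- ===== VERDICT (by name: the statement is the Claim_ definition above) =====
theorem get_particle_combinations_spec : Claim_equal_get_particle_combinations := by
  intro n _
  unfold Spec_get_particle_combinations get_particle_combinations_alt
  by_cases hneg : n < 0
  · rw [if_pos hneg, portA_rows, PySem.List.pyRange_one_eq_nil (by omega)]
    simp
  · rw [if_neg hneg]
    have hn : n = ((n.toNat : Nat) : Int) := by omega
    rw [hn]
    simp only [PySem.List.pyRepeat_singleton, Int.toNat_natCast]
    have hloop := alt_loop_eq n.toNat 0 [List.replicate n.toNat "V"]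
    simp only [List.replicate_zero, List.append_nil, Nat.zero_add] at hloop
    rw [hloop, portA_rows_nat]
    rw [List.range_succ_eq_map, List.map_cons, List.singleton_append, List.map_map]
    congr 1
    · simp
    · apply List.map_congr_left
      intro j _
      simp only [Function.comp_apply]
      have e2 : j + 1 = 1 + j := by omega
      have e1 : n.toNat - (1 + j) = n.toNat - 1 - j := by omega
      simp only [Nat.succ_eq_add_one, e2, e1]
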